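-- pv_equiv track=rewrite | github.com/roshande/codingWebsites | Codechef/EXAM1/exam1.py | calculate_marks
-- ===== SOURCE A (Python) =====
-- def calculate_marks(correct, attempt):
--     marks, n = 0, len(correct)
--     wrong = False
--     for i in range(n):
--         if wrong:
--             wrong = False
--             continue
--         if attempt[i] == 'N':
--             continue
--         if attempt[i] != correct[i]:
--             wrong = True
--         else: #elif attempt[i] == correct[i]:
--             marks += 1
--     return marks
-- ===== SOURCE B (Python) =====
-- def calculate_marks(correct, attempt):
--     n = len(correct)
--     # Stage 1: classify each slot independently: 'N' = not attempted,
--     # 'Y' = matches the key, 'W' = wrong answer.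
--     cls = ['N' if attempt[i] == 'N' else
--            ('Y' if attempt[i] == correct[i] else 'W')
--            for i in range(n)]
--     # Stage 2: a slot is skipped iff the run of consecutive 'W' classifications
--     # immediately before it has odd length; count the unskipped matches.
--     marks = 0
--     run = 0
--     for c in cls:
--         if c == 'Y' and run % 2 == 0:
--             marks += 1
--         run = run + 1 if c == 'W' else 0
--     return marks
-- ===== Notes on version B (the rewrite author's own statement) =====
-- stated objective: alternative
-- what changed: Replaced the sequential wrong-flag state machine by two staged passes: first classify each slot independently (not-attempted/match/wrong), then count matches using the closed-form skip rule 'a slot is skipped iff the run of consecutive wrong classifications immediately before it has odd length'.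
-- outside the precondition, e.g. on calculate_marks(['a', 'b'], ['x']): A returns 0, B raises IndexError
import Mathlib
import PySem

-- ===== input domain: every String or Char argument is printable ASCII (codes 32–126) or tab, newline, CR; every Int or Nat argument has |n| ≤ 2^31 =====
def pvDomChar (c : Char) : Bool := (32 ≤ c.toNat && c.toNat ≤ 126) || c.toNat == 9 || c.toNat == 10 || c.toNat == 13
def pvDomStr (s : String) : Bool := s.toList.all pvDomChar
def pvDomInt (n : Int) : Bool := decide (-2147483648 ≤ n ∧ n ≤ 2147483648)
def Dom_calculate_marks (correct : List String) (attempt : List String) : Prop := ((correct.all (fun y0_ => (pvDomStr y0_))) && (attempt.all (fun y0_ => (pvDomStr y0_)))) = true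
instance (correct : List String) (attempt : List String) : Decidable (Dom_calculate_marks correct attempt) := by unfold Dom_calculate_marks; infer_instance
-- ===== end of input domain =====

-- B replaces A's wrong-flag state machine by two staged passes: classify every slot
-- independently, then count matches with the closed-form skip rule "a slot is skipped iff
-- the run of consecutive wrong classifications just before it has odd length" (objective:
-- alternative). Equivalence is proved on attempts at least as long as the answer key.

-- ===== PORT A =====
-- Port of A: fold over range(n) carrying (marks, wrong); indices inside Pre_ are in range,
-- so attempt[i]/correct[i] are ported as getD (never reached out of range on Pre_).
def calculate_marks (correct : List String) (attempt : List String) : Int :=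
  let n : Int := correct.length
  let step : Int × Bool → Int → Int × Bool := fun st i =>
    let marks := st.1
    let wrong := st.2
    if wrong then (marks, false)
    else if attempt.getD i.toNat "" = "N" then (marks, wrong)
    else if attempt.getD i.toNat "" ≠ correct.getD i.toNat "" then (marks, true)
    else (marks + 1, wrong)
  ((PySem.List.pyRange 0 n 1).foldl step (0, false)).1

-- ===== PORT B =====
-- Port of B, stage 1: the classification list comprehension.
def bClass (correct : List String) (attempt : List String) : List Char :=
  (PySem.List.pyRange 0 correct.length 1).map (fun i =>
    if attempt.getD i.toNat "" = "N" then 'N'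
    else if attempt.getD i.toNat "" = correct.getD i.toNat "" then 'Y' else 'W')

-- Port of B, stage 2: count matches preceded by an even-length run of 'W'.
def bCount (cls : List Char) : Int :=
  (cls.foldl (fun st c =>
    ((if c = 'Y' ∧ st.2 % 2 = 0 then st.1 + 1 else st.1),
     (if c = 'W' then st.2 + 1 else 0))) ((0 : Int), (0 : Int))).1

def calculate_marks_alt (correct : List String) (attempt : List String) : Int :=
  bCount (bClass correct attempt)

-- ===== PRECONDITION & SPEC =====
-- Pre_ requires the attempt list to be at least as long as the answer key: on shorter
-- attempts A may raise IndexError (and B's classification pass always raises there; it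
-- also excludes some short attempts on which A happens to return because the wrong-answer
-- rule skipped the missing slot — see the cite in claim.json).
def Pre_calculate_marks (correct : List String) (attempt : List String) : Prop :=
  correct.length ≤ attempt.length
instance (correct : List String) (attempt : List String) : Decidable (Pre_calculate_marks correct attempt) := by unfold Pre_calculate_marks; infer_instance

def pvWitness_calculate_marks : List String × List String := (["a", "N", "b"], ["a", "N", "c"])

def Spec_calculate_marks (correct : List String) (attempt : List String) (out : Int) : Prop := out = calculate_marks_alt correct attempt
instance (correct : List String) (attempt : List String) (out : Int) : Decidable (Spec_calculate_marks correct attempt out) := by unfold Spec_calculate_marks; infer_instance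

-- ===== CLAIM (what is proved, stated in full; the proofs are below) =====
def Claim_equal_calculate_marks : Prop := ∀ (correct : List String) (attempt : List String), Dom_calculate_marks correct attempt → Pre_calculate_marks correct attempt → Spec_calculate_marks correct attempt (calculate_marks correct attempt)

-- ===== LEMMAS AND PROOFS =====

-- A's step and B's composed step (classification fused into stage 2's fold), as functions.
def aStep (correct : List String) (attempt : List String) : Int × Bool → Int → Int × Bool :=
  fun st i =>
    if st.2 then (st.1, false)
    else if attempt.getD i.toNat "" = "N" then (st.1, st.2)
    else if attempt.getD i.toNat "" ≠ correct.getD i.toNat "" then (st.1, true)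
    else (st.1 + 1, st.2)

def bStep : Int × Int → Char → Int × Int := fun st c =>
  ((if c = 'Y' ∧ st.2 % 2 = 0 then st.1 + 1 else st.1),
   (if c = 'W' then st.2 + 1 else 0))

def bCls (correct : List String) (attempt : List String) : Int → Char := fun i =>
  if attempt.getD i.toNat "" = "N" then 'N'
  else if attempt.getD i.toNat "" = correct.getD i.toNat "" then 'Y' else 'W'

-- Core invariant: over any index list, A's wrong-flag fold and B's run-parity fold agree,
-- provided the flag equals the parity of the run and the marks agree.
theorem fold_invariant (correct attempt : List String) (idx : List Int)
    (marks run : Int) (wrong : Bool) (h : wrong = decide (run % 2 = 1)) (hrun : 0 ≤ run) :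
    (idx.foldl (aStep correct attempt) (marks, wrong)).1 =
    ((idx.map (bCls correct attempt)).foldl bStep (marks, run)).1 := by
  induction idx generalizing marks run wrong with
  | nil => simp
  | cons i rest ih =>
    simp only [List.map_cons, List.foldl_cons]
    by_cases hw : wrong
    · -- flag set: A resets it; run is odd, so B counts nothing and the new run parity is even
      have hodd : run % 2 = 1 := by
        by_contra hne; rw [h] at hw; simp [hne] at hw
      have hb : (bStep (marks, run) (bCls correct attempt i)) =
          (marks, if bCls correct attempt i = 'W' then run + 1 else 0) := by
        simp [bStep, hodd]
      rw [hb]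
      have ha : aStep correct attempt (marks, wrong) i = (marks, false) := by
        simp [aStep, hw]
      rw [ha]
      by_cases hc : bCls correct attempt i = 'W'
      · simp only [hc, if_pos]
        exact ih marks (run + 1) false (by simp; omega) (by omega)
      · simp only [hc, if_neg, not_false_iff]
        exact ih marks 0 false (by simp) (by omega)
    · -- flag clear: run is even
      have heven : run % 2 = 0 := by
        by_contra hne
        have : run % 2 = 1 := by omega
        rw [h] at hw; simp [this] at hw
      simp only [Bool.not_eq_true] at hw
      subst hw
      by_cases hN : attempt[i.toNat]?.getD "" = "N"
      · have ha : aStep correct attempt (marks, false) i = (marks, false) := by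
          simp [aStep, hN]
        have hb : bStep (marks, run) (bCls correct attempt i) = (marks, 0) := by
          simp [bStep, bCls, hN]
        rw [ha, hb]
        exact ih marks 0 false (by simp) (by omega)
      · by_cases heq : attempt[i.toNat]?.getD "" = correct[i.toNat]?.getD ""
        · have hN' : ¬ correct[i.toNat]?.getD "" = "N" := heq ▸ hN
          have ha : aStep correct attempt (marks, false) i = (marks + 1, false) := by
            simp [aStep, hN', heq]
          have hb : bStep (marks, run) (bCls correct attempt i) = (marks + 1, 0) := by
            simp [bStep, bCls, hN', heq, heven]
          rw [ha, hb]
          exact ih (marks + 1) 0 false (by simp) (by omega)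
        · have ha : aStep correct attempt (marks, false) i = (marks, true) := by
            simp [aStep, hN, heq]
          have hb : bStep (marks, run) (bCls correct attempt i) = (marks, run + 1) := by
            simp [bStep, bCls, hN, heq, heven]
          rw [ha, hb]
          exact ih marks (run + 1) true (by simp; omega) (by omega)

theorem calculate_marks_spec : Claim_equal_calculate_marks := by
  intro correct attempt _ _
  unfold Spec_calculate_marks calculate_marks calculate_marks_alt bCount bClass
  exact fold_invariant correct attempt (PySem.List.pyRange 0 correct.length 1) 0 0 false
    (by decide) (by omega)
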